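-- pv_equiv track=rewrite | github.com/VLevski/Programming0-1 | week3/4-Problems-Construction/fib_number.py | add_n_to_number
-- ===== SOURCE A (Python) =====
-- def add_n_to_number(num, n):
--     numbers = []
--
--     while n != 0:
--         numbers += [n % 10]
--         n //= 10
--
--     index = len(numbers) - 1
--
--     while index >= 0:
--         num = num*10 + numbers[index]
--         index -= 1
--
--     return num
-- ===== SOURCE B (Python) =====
-- def add_n_to_number(num, n):
--     original = n
--     count = 0
--     while n != 0:
--         count += 1
--         n //= 10
--     return num * 10**count + original
-- ===== Notes on version B (the rewrite author's own statement) =====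
-- stated objective: simpler
-- what changed: B drops the digit list and the reconstruction loop entirely: it only counts the digits of n in one loop and returns the closed form num * 10**count + n.
import Mathlib
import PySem

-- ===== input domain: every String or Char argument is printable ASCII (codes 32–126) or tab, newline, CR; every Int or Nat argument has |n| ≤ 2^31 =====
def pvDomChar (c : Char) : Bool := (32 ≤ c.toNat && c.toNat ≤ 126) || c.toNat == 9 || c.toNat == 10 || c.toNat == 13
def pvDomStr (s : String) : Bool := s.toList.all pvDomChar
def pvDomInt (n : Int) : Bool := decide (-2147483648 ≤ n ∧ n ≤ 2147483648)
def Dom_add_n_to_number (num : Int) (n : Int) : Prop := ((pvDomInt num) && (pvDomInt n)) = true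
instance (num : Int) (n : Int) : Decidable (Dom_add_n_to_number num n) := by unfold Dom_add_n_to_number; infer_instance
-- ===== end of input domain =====

-- ===== PORT A =====
-- B changes only the strategy (digit count + one multiplication instead of a digit list
-- and a reconstruction loop); objective: simpler.
-- A's first loop `while n != 0: n //= 10` diverges for n < 0 (n stalls at -1), so its
-- guard is ported as `0 < n` (identical behaviour for all n ≥ 0, i.e. on Pre_).

-- `while n != 0: numbers += [n % 10]; n //= 10`
def pvLoop1 (n : Int) (acc : List Int) : List Int :=
  if h : 0 < n then
    pvLoop1 (PySem.Int.floordiv n 10) (acc ++ [PySem.Int.mod n 10])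
  else acc
termination_by n.toNat
decreasing_by
  rw [PySem.Int.floordiv_eq_ediv_of_pos (by omega)]
  omega

-- `while index >= 0: num = num*10 + numbers[index]; index -= 1`
-- (numbers[index] is always in range on the actual call; `.getD 0` only totalizes)
def pvLoop2 (num : Int) (numbers : List Int) (index : Int) : Int :=
  if h : 0 ≤ index then
    pvLoop2 (num * 10 + (PySem.List.pyGet? numbers index).getD 0) numbers (index - 1)
  else num
termination_by (index + 1).toNat
decreasing_by omega

def add_n_to_number (num : Int) (n : Int) : Int :=
  let numbers := pvLoop1 n []
  pvLoop2 num numbers ((numbers.length : Int) - 1)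

-- ===== PORT B =====
-- `count = 0; while n != 0: count += 1; n //= 10` (same guard reading as port A)
def pvCount (n : Int) : Nat :=
  if h : 0 < n then pvCount (PySem.Int.floordiv n 10) + 1 else 0
termination_by n.toNat
decreasing_by
  rw [PySem.Int.floordiv_eq_ediv_of_pos (by omega)]
  omega

def add_n_to_number_alt (num : Int) (n : Int) : Int :=
  num * (10 : Int) ^ pvCount n + n

-- ===== PRECONDITION & SPEC =====
-- Pre_ excludes n < 0, on which A's first while loop never terminates (n //= 10 stalls at -1).
def Pre_add_n_to_number (num : Int) (n : Int) : Prop := 0 ≤ n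
instance (num : Int) (n : Int) : Decidable (Pre_add_n_to_number num n) := by
  unfold Pre_add_n_to_number; infer_instance

def pvWitness_add_n_to_number : Int × Int := (7, 123)

def Spec_add_n_to_number (num : Int) (n : Int) (out : Int) : Prop := out = add_n_to_number_alt num n
instance (num : Int) (n : Int) (out : Int) : Decidable (Spec_add_n_to_number num n out) := by
  unfold Spec_add_n_to_number; infer_instance

-- ===== CLAIM (what is proved, stated in full; the proofs are below) =====
def Claim_equal_add_n_to_number : Prop :=
  ∀ (num : Int) (n : Int), Dom_add_n_to_number num n → Pre_add_n_to_number num n →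
    Spec_add_n_to_number num n (add_n_to_number num n)

-- ===== LEMMAS AND PROOFS =====

-- little-endian digit list of n and its value
def pvDigits (n : Int) : List Int :=
  if h : 0 < n then PySem.Int.mod n 10 :: pvDigits (PySem.Int.floordiv n 10) else []
termination_by n.toNat
decreasing_by
  rw [PySem.Int.floordiv_eq_ediv_of_pos (by omega)]
  omega

def pvVal : List Int → Int
  | [] => 0
  | d :: ds => d + 10 * pvVal ds

theorem pvLoop1_eq (n : Int) (acc : List Int) : pvLoop1 n acc = acc ++ pvDigits n := by
  fun_induction pvLoop1 n acc with
  | case1 n acc h ih =>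
    rw [ih]
    conv_rhs => rw [pvDigits, dif_pos h]
    simp
  | case2 n acc h =>
    rw [pvDigits, dif_neg h]
    simp

theorem pvCount_eq (n : Int) : pvCount n = (pvDigits n).length := by
  fun_induction pvCount n with
  | case1 n h ih =>
    rw [pvDigits, dif_pos h, List.length_cons, ih]
  | case2 n h =>
    rw [pvDigits, dif_neg h]
    rfl

theorem pvVal_digits (n : Int) (hn : 0 ≤ n) : pvVal (pvDigits n) = n := by
  fun_induction pvDigits n with
  | case1 n h ih =>
    have hq : 0 ≤ PySem.Int.floordiv n 10 := by
      rw [PySem.Int.floordiv_eq_ediv_of_pos (by omega)]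
      omega
    have hfm := PySem.Int.floordiv_mul_add_mod n 10
    simp only [pvVal, ih hq]
    omega
  | case2 n h =>
    simp [pvVal]
    omega

theorem pvLoop2_shift (k : Nat) (ds : List Int) (d : Int) (num : Int)
    (hk : k ≤ ds.length) :
    pvLoop2 num (d :: ds) (k : Int) = pvLoop2 num ds ((k : Int) - 1) * 10 + d := by
  induction k generalizing num with
  | zero =>
    rw [Nat.cast_zero, pvLoop2, dif_pos le_rfl, PySem.List.pyGet?_zero_cons,
      pvLoop2, dif_neg (by omega), pvLoop2, dif_neg (by omega)]
    simp
  | succ k ih =>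
    have hklt : k < ds.length := by omega
    rw [pvLoop2, dif_pos (by positivity)]
    have hget : PySem.List.pyGet? (d :: ds) ((k + 1 : Nat) : Int) = some ds[k] := by
      have hc : ((k + 1 : Nat) : Int) = ((k : Nat) : Int) + 1 := by push_cast; ring
      rw [hc, PySem.List.pyGet?_cons_succ, PySem.List.pyGet?_natCast]
      exact List.getElem?_eq_getElem hklt
    rw [hget]
    have h1 : ((k + 1 : Nat) : Int) - 1 = (k : Int) := by push_cast; ring
    rw [h1, ih _ (by omega)]
    conv_rhs => rw [pvLoop2]
    rw [dif_pos (by positivity), PySem.List.pyGet?_natCast,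
      List.getElem?_eq_getElem hklt]

theorem pvLoop2_val (ds : List Int) (num : Int) :
    pvLoop2 num ds ((ds.length : Int) - 1) = num * 10 ^ ds.length + pvVal ds := by
  induction ds generalizing num with
  | nil =>
    rw [pvLoop2, dif_neg (by simp)]
    simp [pvVal]
  | cons d ds ih =>
    have hl : (((d :: ds).length : Nat) : Int) - 1 = ((ds.length : Nat) : Int) := by
      simp
    rw [hl, pvLoop2_shift ds.length ds d num le_rfl, ih]
    simp only [pvVal, List.length_cons, pow_succ]
    ring

-- ===== VERDICT (by name: the statement is the Claim_ definition above) =====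
theorem add_n_to_number_spec : Claim_equal_add_n_to_number := by
  intro num n _ hpre
  unfold Spec_add_n_to_number add_n_to_number add_n_to_number_alt
  rw [pvLoop1_eq, List.nil_append, pvLoop2_val, pvCount_eq, pvVal_digits n hpre]
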